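-- pv_equiv track=rewrite | github.com/DragunWF/Competitive-Programming | CodeWars/python/7_kyu/array_conversion.py | array_conversion
-- ===== SOURCE A (Python) =====
-- def array_conversion(arr: list[int]) -> int:
--     iteration = 1
--     current = [*arr]
--     temp = []
--
--     while len(current) > 1:
--         is_product = iteration % 2 == 0
--         for i in range(0, len(current), 2):
--             if is_product:
--                 temp.append(current[i] * current[i + 1])
--             else:
--                 temp.append(current[i] + current[i + 1])
--         current = [*temp]
--         temp = []
--         iteration += 1
--
--     return current[0]
-- ===== SOURCE B (Python) =====
-- def array_conversion(arr: list[int]) -> int: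
--     def pairs(cur, add):
--         if len(cur) < 2:
--             return []
--         head = cur[0] + cur[1] if add else cur[0] * cur[1]
--         return [head] + pairs(cur[2:], add)
--
--     def level(cur, it):
--         if len(cur) <= 1:
--             return cur[0]
--         return level(pairs(cur, it % 2 == 1), it + 1)
--
--     return level(list(arr), 1)
-- ===== Notes on version B (the rewrite author's own statement) =====
-- stated objective: alternative
-- what changed: Replaces the iterative while/for index loop with two mutable buffers by a pure recursive decomposition: a structural helper combines adjacent pairs by pattern (first two elements, then the tail), and a recursive level function threads the iteration parity.
import Mathlib
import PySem

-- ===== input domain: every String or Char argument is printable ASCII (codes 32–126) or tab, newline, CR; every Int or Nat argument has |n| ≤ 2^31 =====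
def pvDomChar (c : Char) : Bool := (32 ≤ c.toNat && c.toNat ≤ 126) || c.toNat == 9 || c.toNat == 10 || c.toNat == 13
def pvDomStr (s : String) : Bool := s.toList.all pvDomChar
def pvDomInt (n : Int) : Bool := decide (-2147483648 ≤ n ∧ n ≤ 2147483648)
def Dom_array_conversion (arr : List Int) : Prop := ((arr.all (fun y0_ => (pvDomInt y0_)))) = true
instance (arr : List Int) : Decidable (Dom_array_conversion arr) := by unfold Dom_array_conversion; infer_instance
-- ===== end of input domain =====

-- B replaces A's while/for index loop over two mutable buffers by a pure recursive
-- pairing decomposition (objective: alternative; same value wherever A returns).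

-- ===== PORT A =====
-- `for i in range(0, len(current), 2)` appending into temp; the out-of-range read of
-- current[i + 1] (IndexError in Python, reached only on odd-length levels) is excluded
-- by Pre_, and rendered with getD 0 here.
def pvForA (cur temp : List Int) (isProd : Bool) (i : Nat) : List Int :=
  if i < cur.length then
    pvForA cur
      (temp ++ [if isProd then (PySem.List.pyGet? cur (i : Int)).getD 0 * (PySem.List.pyGet? cur ((i : Int) + 1)).getD 0
                else (PySem.List.pyGet? cur (i : Int)).getD 0 + (PySem.List.pyGet? cur ((i : Int) + 1)).getD 0])
      isProd (i + 2)
  else temp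
termination_by cur.length - i

-- the `while len(current) > 1` loop; fuel = arr.length never runs out inside Pre_.
def pvLoopA (fuel : Nat) (iteration : Int) (current : List Int) : Int :=
  match fuel with
  | 0 => (PySem.List.pyGet? current 0).getD 0
  | fuel + 1 =>
    if current.length > 1 then
      pvLoopA fuel (iteration + 1) (pvForA current [] (PySem.Int.mod iteration 2 == 0) 0)
    else (PySem.List.pyGet? current 0).getD 0

def array_conversion (arr : List Int) : Int := pvLoopA arr.length 1 arr

-- ===== PORT B =====
-- Source B's `pairs`: combine the first two elements, recurse on cur[2:].
def pvPairsB (add : Bool) : List Int → List Int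
  | a :: b :: rest => (if add then a + b else a * b) :: pvPairsB add rest
  | _ => []

-- Source B's `level`; fuel = arr.length never runs out inside Pre_; cur[0] on the empty
-- list (IndexError in Python, excluded by Pre_) is rendered with getD 0.
def pvLevelB (fuel : Nat) (cur : List Int) (it : Int) : Int :=
  match fuel with
  | 0 => (PySem.List.pyGet? cur 0).getD 0
  | fuel + 1 =>
    if cur.length ≤ 1 then (PySem.List.pyGet? cur 0).getD 0
    else pvLevelB fuel (pvPairsB (PySem.Int.mod it 2 == 1) cur) (it + 1)

def array_conversion_alt (arr : List Int) : Int := pvLevelB arr.length arr 1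

-- ===== PRECONDITION & SPEC =====
-- Python A raises IndexError exactly when arr's length is not a power of two (empty
-- input, or some pairing level has odd length); Pre_ excludes exactly those inputs.
def Pre_array_conversion (arr : List Int) : Prop := arr.length = 2 ^ Nat.log2 arr.length
instance (arr : List Int) : Decidable (Pre_array_conversion arr) := by unfold Pre_array_conversion; infer_instance
def pvWitness_array_conversion : List Int := ([1, 2, 3, 4])

def Spec_array_conversion (arr : List Int) (out : Int) : Prop := out = array_conversion_alt arr
instance (arr : List Int) (out : Int) : Decidable (Spec_array_conversion arr out) := by unfold Spec_array_conversion; infer_instance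

-- ===== CLAIM (what is proved, stated in full; the proofs are below) =====
def Claim_equal_array_conversion : Prop := ∀ (arr : List Int), Dom_array_conversion arr → Pre_array_conversion arr → Spec_array_conversion arr (array_conversion arr)

-- ===== LEMMAS AND PROOFS =====

theorem pvPairsB_length_even (b : Bool) :
    ∀ (l : List Int), 2 ∣ l.length → (pvPairsB b l).length = l.length / 2
  | a :: c :: rest, h => by
      simp only [pvPairsB, List.length_cons]
      have h2 : 2 ∣ rest.length := by
        simp only [List.length_cons] at h; omega
      rw [pvPairsB_length_even b rest h2]; omega
  | [], _ => by simp [pvPairsB]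
  | [a], h => by simp [List.length] at h

theorem pvForA_spec (p : Bool) (cur : List Int) (hev : 2 ∣ cur.length) :
    ∀ (n : Nat) (temp : List Int) (i : Nat), 2 ∣ i → i ≤ cur.length →
      cur.length - i ≤ 2 * n →
      pvForA cur temp p i = temp ++ pvPairsB (!p) (cur.drop i) := by
  intro n
  induction n with
  | zero =>
      intro temp i _ hle hn
      have hi : i = cur.length := by omega
      rw [pvForA]
      simp [hi, pvPairsB]
  | succ n ih =>
      intro temp i hdvd hle hn
      rw [pvForA]
      by_cases hlt : i < cur.length
      · have h1 : i + 1 < cur.length := by omega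
        have hdrop : cur.drop i = cur[i] :: cur[i + 1] :: cur.drop (i + 2) := by
          rw [List.drop_eq_getElem_cons hlt, List.drop_eq_getElem_cons h1]
        have hg0 : PySem.List.pyGet? cur (i : Int) = some cur[i] :=
          PySem.List.pyGet?_ofNat cur i hlt
        have hg1 : PySem.List.pyGet? cur ((i : Int) + 1) = some cur[i + 1] := by
          have : ((i : Int) + 1) = ((i + 1 : Nat) : Int) := by push_cast; ring
          rw [this]; exact PySem.List.pyGet?_ofNat cur (i + 1) h1
        rw [if_pos hlt, ih (temp ++ [_]) (i + 2) (by omega) (by omega) (by omega),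
            hdrop]
        simp only [pvPairsB, hg0, hg1, Option.getD_some, List.append_assoc,
          List.singleton_append]
        cases p <;> simp
      · have hi : i = cur.length := by omega
        rw [if_neg hlt]
        simp [hi, pvPairsB]

theorem pvMod2_cases (it : Int) :
    PySem.Int.mod it 2 = 0 ∨ PySem.Int.mod it 2 = 1 := by
  simp only [PySem.Int.mod, Int.fmod_eq_emod_of_nonneg _ (by norm_num : (0:Int) ≤ 2)]
  omega

theorem pvLoop_eq : ∀ (k fuel : Nat) (it : Int) (cur : List Int),
    cur.length = 2 ^ k → k ≤ fuel → pvLoopA fuel it cur = pvLevelB fuel cur it := by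
  intro k
  induction k with
  | zero =>
      intro fuel it cur hlen _
      match fuel with
      | 0 => rfl
      | fuel + 1 =>
        rw [pvLoopA, pvLevelB]
        simp [hlen]
  | succ k ih =>
      intro fuel it cur hlen hfuel
      match fuel with
      | 0 => omega
      | fuel + 1 =>
        have hgt : cur.length > 1 := by
          rw [hlen]; exact Nat.one_lt_two_pow_iff.mpr (by omega)
        have hev : 2 ∣ cur.length := by
          rw [hlen, pow_succ]; exact ⟨2 ^ k, by ring⟩
        have hstep : pvForA cur [] (PySem.Int.mod it 2 == 0) 0
            = pvPairsB (PySem.Int.mod it 2 == 1) cur := by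
          rw [pvForA_spec _ cur hev cur.length [] 0 (by omega) (by omega) (by omega)]
          rcases pvMod2_cases it with h | h <;> rw [h] <;> rfl
        have hlen' : (pvPairsB (PySem.Int.mod it 2 == 1) cur).length = 2 ^ k := by
          rw [pvPairsB_length_even _ cur hev, hlen, pow_succ]; omega
        rw [pvLoopA, pvLevelB, if_pos hgt, if_neg (by omega), hstep]
        exact ih fuel (it + 1) _ hlen' (by omega)

-- ===== VERDICT (by name: the statement is the Claim_ definition above) =====
theorem array_conversion_spec : Claim_equal_array_conversion := by
  intro arr _ hpre
  unfold Spec_array_conversion array_conversion array_conversion_alt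
  have hk : Nat.log2 arr.length ≤ arr.length := by
    calc Nat.log2 arr.length ≤ 2 ^ Nat.log2 arr.length :=
          le_of_lt (Nat.lt_two_pow_self)
      _ = arr.length := hpre.symm
  exact pvLoop_eq (Nat.log2 arr.length) arr.length 1 arr hpre hk
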